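-- pv_equiv track=rewrite | github.com/Rix01/Coding_Test | 프로그래머스/0/120837. 개미 군단/개미 군단.py | solution
-- ===== SOURCE A (Python) =====
-- def solution(hp):
--     ants = [5,3,1]
--     cnt = 0
--     for power in ants:
--         antCnt = hp//power
--         hp -= power*antCnt
--         cnt += antCnt
--     return cnt
-- ===== SOURCE B (Python) =====
-- REST_ANTS = [0, 1, 2, 1, 2]  # ants needed (3s and 1s) for each residue hp % 5
--
-- def solution(hp):
--     q, r = divmod(hp, 5)
--     return q + REST_ANTS[r]
-- ===== Notes on version B (the rewrite author's own statement) =====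
-- stated objective: simpler
-- what changed: Replaced the cascading greedy division loop (divide by five, then the remainder by three, then by one, with mutable hp/cnt accumulators) by a single divmod of hp by five plus a precomputed residue lookup table giving the ant count for each remainder.
import Mathlib
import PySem

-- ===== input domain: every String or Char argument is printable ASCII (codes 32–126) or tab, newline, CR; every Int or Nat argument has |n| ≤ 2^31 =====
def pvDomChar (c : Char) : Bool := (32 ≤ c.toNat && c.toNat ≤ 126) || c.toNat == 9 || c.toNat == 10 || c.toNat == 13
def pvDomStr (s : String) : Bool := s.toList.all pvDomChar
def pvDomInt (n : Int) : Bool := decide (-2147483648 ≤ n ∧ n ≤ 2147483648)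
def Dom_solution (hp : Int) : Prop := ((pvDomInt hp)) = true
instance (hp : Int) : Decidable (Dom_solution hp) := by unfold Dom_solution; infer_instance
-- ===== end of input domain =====

-- B replaces A's cascading greedy division loop by one divmod and a precomputed
-- residue lookup table (objective: simpler).


-- ===== PORT A =====
-- loop over ants = [5,3,1] carrying (hp, cnt)
def solution (hp : Int) : Int :=
  (([5, 3, 1] : List Int).foldl
    (fun (st : Int × Int) (power : Int) =>
      let antCnt := PySem.Int.floordiv st.1 power
      (st.1 - power * antCnt, st.2 + antCnt))
    (hp, 0)).2

-- ===== PORT B =====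
-- ants needed (3s and 1s) for each residue hp % 5
def REST_ANTS : List Int := [0, 1, 2, 1, 2]

-- q, r = divmod(hp, 5); q + REST_ANTS[r].  r = hp % 5 is always in [0,5), so the
-- table lookup never raises; .getD 0 is unreachable.
def solution_alt (hp : Int) : Int :=
  let q := PySem.Int.floordiv hp 5
  let r := PySem.Int.mod hp 5
  q + (PySem.List.pyGet? REST_ANTS r).getD 0

-- ===== PRECONDITION & SPEC =====
def Spec_solution (hp : Int) (out : Int) : Prop := out = solution_alt hp
instance (hp : Int) (out : Int) : Decidable (Spec_solution hp out) := by unfold Spec_solution; infer_instance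

-- ===== CLAIM (what is proved, stated in full; the proofs are below) =====
def Claim_equal_solution : Prop := ∀ (hp : Int), Dom_solution hp → Spec_solution hp (solution hp)

-- ===== LEMMAS AND PROOFS =====

-- ===== VERDICT (by name: the statement is the Claim_ definition above) =====
theorem solution_spec : Claim_equal_solution := by
  intro hp _
  unfold Spec_solution solution solution_alt REST_ANTS
  simp only [List.foldl]
  rw [PySem.Int.floordiv_eq_ediv_of_pos (by norm_num : (0:Int) < 5),
      PySem.Int.floordiv_eq_ediv_of_pos (by norm_num : (0:Int) < 3),
      PySem.Int.floordiv_eq_ediv_of_pos (by norm_num : (0:Int) < 1),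
      PySem.Int.mod_eq_emod_of_pos (by norm_num : (0:Int) < 5)]
  have hr0 : 0 ≤ hp % 5 := Int.emod_nonneg hp (by norm_num)
  have hr5 : hp % 5 < 5 := Int.emod_lt_of_pos hp (by norm_num)
  interval_cases h : hp % 5 <;>
    simp [PySem.List.pyGet?, PySem.List.pyIdx?] <;> omega
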